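-- pv_equiv track=rewrite | github.com/aimasteracc/tree-sitter-analyzer | tree_sitter_analyzer/legacy_table_formatter.py | _get_class_methods
-- ===== SOURCE A (Python) =====
-- from typing import Any
--
-- def _get_class_methods(
--     data: dict[str, Any], class_line_range: dict[str, int]
-- ) -> list[dict[str, Any]]:
--     """Get methods that belong to a specific class based on line range, excluding nested classes."""
--     methods = data.get("methods", [])
--     classes = data.get("classes", [])
--     class_methods = []
--
--     # Get nested class ranges to exclude their methods
--     nested_class_ranges = []
--     for cls in classes:
--         cls_range = cls.get("line_range", {})
--         cls_start = cls_range.get("start", 0)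
--         cls_end = cls_range.get("end", 0)
--
--         # If this class is nested within the current class range
--         if class_line_range.get(
--             "start", 0
--         ) < cls_start and cls_end < class_line_range.get("end", 0):
--             nested_class_ranges.append((cls_start, cls_end))
--
--     for method in methods:
--         method_line = method.get("line_range", {}).get("start", 0)
--
--         # Check if method is within the class range
--         if (
--             class_line_range.get("start", 0)
--             <= method_line
--             <= class_line_range.get("end", 0)
--         ):
--             # Check if method is NOT within any nested class
--             in_nested_class = False
--             for nested_start, nested_end in nested_class_ranges:
--                 if nested_start <= method_line <= nested_end:
--                     in_nested_class = True
--                     break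
--
--             if not in_nested_class:
--                 class_methods.append(method)
--
--     return class_methods
-- ===== SOURCE B (Python) =====
-- from typing import Any
-- from bisect import bisect_right
--
--
-- def _get_class_methods(
--     data: dict[str, Any], class_line_range: dict[str, int]
-- ) -> list[dict[str, Any]]:
--     """Same result as A, but nested-class ranges are sorted and merged into
--     disjoint intervals once, so each method needs one binary search instead
--     of a scan over all nested classes."""
--     methods = data.get("methods", [])
--     classes = data.get("classes", [])
--     cstart = class_line_range.get("start", 0)
--     cend = class_line_range.get("end", 0)
--
--     nested = []
--     for cls in classes:
--         r = cls.get("line_range", {})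
--         s = r.get("start", 0)
--         e = r.get("end", 0)
--         if cstart < s and e < cend:
--             nested.append((s, e))
--     nested.sort(key=lambda p: p[0])
--
--     # merge into disjoint intervals (consecutive merged intervals satisfy end < next start)
--     merged = []
--     cur = None
--     for s, e in nested:
--         if cur is None:
--             cur = (s, e)
--         elif s <= cur[1]:
--             if e > cur[1]:
--                 cur = (cur[0], e)
--         else:
--             merged.append(cur)
--             cur = (s, e)
--     if cur is not None:
--         merged.append(cur)
--
--     starts = [s for s, _ in merged]
--     ends = [e for _, e in merged]
--
--     out = []
--     for m in methods:
--         x = m.get("line_range", {}).get("start", 0)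
--         if cstart <= x <= cend:
--             i = bisect_right(starts, x)
--             if i == 0 or x > ends[i - 1]:
--                 out.append(m)
--     return out
-- ===== Notes on version B (the rewrite author's own statement) =====
-- stated objective: alternative
-- what changed: Instead of scanning every nested-class range for every method, B sorts the nested ranges once, merges them into disjoint intervals, and decides containment for each method line with one binary search.
import Mathlib
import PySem

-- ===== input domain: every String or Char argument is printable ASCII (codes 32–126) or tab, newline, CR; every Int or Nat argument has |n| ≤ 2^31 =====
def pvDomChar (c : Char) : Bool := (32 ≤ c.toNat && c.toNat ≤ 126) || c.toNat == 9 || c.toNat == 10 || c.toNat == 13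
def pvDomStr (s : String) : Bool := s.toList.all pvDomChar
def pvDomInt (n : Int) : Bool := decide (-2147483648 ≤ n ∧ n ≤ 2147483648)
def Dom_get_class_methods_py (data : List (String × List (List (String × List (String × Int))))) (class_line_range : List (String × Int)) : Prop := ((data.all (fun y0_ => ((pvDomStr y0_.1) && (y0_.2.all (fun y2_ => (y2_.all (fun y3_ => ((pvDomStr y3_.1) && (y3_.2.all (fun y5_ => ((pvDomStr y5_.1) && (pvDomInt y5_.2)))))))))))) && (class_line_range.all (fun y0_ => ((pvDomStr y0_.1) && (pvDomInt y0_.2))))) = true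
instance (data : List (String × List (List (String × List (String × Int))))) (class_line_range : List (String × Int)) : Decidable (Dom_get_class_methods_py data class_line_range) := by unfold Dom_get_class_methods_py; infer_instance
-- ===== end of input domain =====

-- B replaces A's per-method scan over all nested-class ranges by sorting the nested ranges once,
-- merging them into disjoint intervals, and binary-searching each method line (objective: alternative).

-- ===== PORT A =====
-- dict.get(k, dflt) on the association-list encoding of a Python dict (first match).
def pyGetDflt {α : Type} (d : List (String × α)) (k : String) (dflt : α) : α :=
  PySem.Dict.getD (PySem.Dict.mk d) k dflt

def get_class_methods_py (data : List (String × List (List (String × List (String × Int))))) (class_line_range : List (String × Int)) : List (List (String × List (String × Int))) :=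
  let methods := pyGetDflt data "methods" []
  let classes := pyGetDflt data "classes" []
  let class_methods : List (List (String × List (String × Int))) := []
  let nested_class_ranges : List (Int × Int) :=
    classes.foldl (fun acc cls =>
      let cls_range := pyGetDflt cls "line_range" []
      let cls_start := pyGetDflt cls_range "start" 0
      let cls_end := pyGetDflt cls_range "end" 0
      if pyGetDflt class_line_range "start" 0 < cls_start ∧ cls_end < pyGetDflt class_line_range "end" 0
      then acc ++ [(cls_start, cls_end)] else acc) []
  methods.foldl (fun acc method =>
    let method_line := pyGetDflt (pyGetDflt method "line_range" []) "start" 0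
    if pyGetDflt class_line_range "start" 0 ≤ method_line ∧ method_line ≤ pyGetDflt class_line_range "end" 0 then
      -- the inner for/break loop: once the flag is true it stays true, so dropping the break is value-equal
      let in_nested_class := nested_class_ranges.foldl (fun ok p =>
        if p.1 ≤ method_line ∧ method_line ≤ p.2 then true else ok) false
      if ¬ in_nested_class then acc ++ [method] else acc
    else acc) class_methods

-- ===== PORT B =====
-- one merge step of Source B's loop over the sorted nested intervals; state = (merged, cur)
def pvMergeStep (mc : List (Int × Int) × Option (Int × Int)) (p : Int × Int) :
    List (Int × Int) × Option (Int × Int) :=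
  match mc.2 with
  | none => (mc.1, some p)
  | some c =>
    if p.1 ≤ c.2 then
      (if p.2 > c.2 then (mc.1, some (c.1, p.2)) else mc)
    else (mc.1 ++ [c], some p)

def get_class_methods_py_alt (data : List (String × List (List (String × List (String × Int))))) (class_line_range : List (String × Int)) : List (List (String × List (String × Int))) :=
  let methods := pyGetDflt data "methods" []
  let classes := pyGetDflt data "classes" []
  let cstart := pyGetDflt class_line_range "start" 0
  let cend := pyGetDflt class_line_range "end" 0
  let nested : List (Int × Int) :=
    classes.foldl (fun acc cls =>
      let r := pyGetDflt cls "line_range" []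
      let s := pyGetDflt r "start" 0
      let e := pyGetDflt r "end" 0
      if cstart < s ∧ e < cend then acc ++ [(s, e)] else acc) []
  let nested := PySem.List.sorted nested (fun p => p.1) false
  let mc := nested.foldl pvMergeStep ([], none)
  let merged := match mc.2 with
    | some c => mc.1 ++ [c]
    | none => mc.1
  let starts := merged.map (fun p => p.1)
  let ends := merged.map (fun p => p.2)
  methods.foldl (fun acc m =>
    let x := pyGetDflt (pyGetDflt m "line_range" []) "start" 0
    if cstart ≤ x ∧ x ≤ cend then
      let i := PySem.List.bisectRight starts x
      if i = 0 ∨ x > ends.getD (i - 1) 0 then acc ++ [m] else acc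
    else acc) []

-- ===== PRECONDITION & SPEC =====
def Spec_get_class_methods_py (data : List (String × List (List (String × List (String × Int))))) (class_line_range : List (String × Int)) (out : List (List (String × List (String × Int)))) : Prop := out = get_class_methods_py_alt data class_line_range
instance (data : List (String × List (List (String × List (String × Int))))) (class_line_range : List (String × Int)) (out : List (List (String × List (String × Int)))) : Decidable (Spec_get_class_methods_py data class_line_range out) := by unfold Spec_get_class_methods_py; infer_instance

-- ===== CLAIM (what is proved, stated in full; the proofs are below) =====
def Claim_equal_get_class_methods_py : Prop := ∀ (data : List (String × List (List (String × List (String × Int))))) (class_line_range : List (String × Int)), Dom_get_class_methods_py data class_line_range → Spec_get_class_methods_py data class_line_range (get_class_methods_py data class_line_range)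

-- ===== LEMMAS AND PROOFS =====

-- "some interval of l contains x"
def pvCovered (l : List (Int × Int)) (x : Int) : Bool :=
  l.any (fun p => decide (p.1 ≤ x) && decide (x ≤ p.2))

-- Source B's merged list, as the port computes it from the unsorted nested intervals
def pvMergedOf (ns : List (Int × Int)) : List (Int × Int) :=
  let mc := (PySem.List.sorted ns (fun p => p.1) false).foldl pvMergeStep ([], none)
  match mc.2 with
  | some c => mc.1 ++ [c]
  | none => mc.1

theorem pvCovered_append (l₁ l₂ : List (Int × Int)) (x : Int) :
    pvCovered (l₁ ++ l₂) x = (pvCovered l₁ x || pvCovered l₂ x) := by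
  simp [pvCovered]

theorem merge_inv (l : List (Int × Int)) : ∀ (m : List (Int × Int)) (c : Int × Int),
    (∀ p ∈ l, c.1 ≤ p.1) → l.Pairwise (fun a b => a.1 ≤ b.1) →
    (m ++ [c]).Pairwise (fun a b => a.1 ≤ b.1) → (m ++ [c]).IsChain (fun a b => a.2 < b.1) →
    ∃ m' c', l.foldl pvMergeStep (m, some c) = (m', some c') ∧
      (m' ++ [c']).Pairwise (fun a b => a.1 ≤ b.1) ∧
      (m' ++ [c']).IsChain (fun a b => a.2 < b.1) ∧
      ∀ x, pvCovered (m' ++ [c']) x = (pvCovered (m ++ [c]) x || pvCovered l x) := by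
  induction l with
  | nil =>
    intro m c _ _ hp hc
    exact ⟨m, c, rfl, hp, hc, by simp [pvCovered]⟩
  | cons p t ih =>
    intro m c h1 hsort hp hc
    have hcp : c.1 ≤ p.1 := h1 p (by simp)
    have h1t : ∀ q ∈ t, p.1 ≤ q.1 := (List.pairwise_cons.mp hsort).1
    have hsortt := (List.pairwise_cons.mp hsort).2
    simp only [List.foldl_cons]
    by_cases hle : p.1 ≤ c.2
    · by_cases hgt : p.2 > c.2
      · have hstep : pvMergeStep (m, some c) p = (m, some (c.1, p.2)) := by
          simp [pvMergeStep, hle, hgt]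
        rw [hstep]
        obtain ⟨m', c', heq, hp', hc', hcov⟩ := ih m (c.1, p.2)
          (fun q hq => le_trans hcp (h1t q hq)) hsortt
          (by
            rw [List.pairwise_append] at hp ⊢
            refine ⟨hp.1, by simp, fun a ha b hb => ?_⟩
            simp at hb; subst hb
            simpa using hp.2.2 a ha c (by simp))
          (by
            rw [List.isChain_append] at hc ⊢
            refine ⟨hc.1, by simp, fun a ha b hb => ?_⟩
            simp at hb; subst hb
            simpa using hc.2.2 a ha)
        refine ⟨m', c', heq, hp', hc', fun x => ?_⟩
        rw [hcov x]
        have hone : (decide (c.1 ≤ x) && decide (x ≤ p.2))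
            = ((decide (c.1 ≤ x) && decide (x ≤ c.2)) || (decide (p.1 ≤ x) && decide (x ≤ p.2))) := by
          rw [Bool.eq_iff_iff]
          simp only [Bool.and_eq_true, Bool.or_eq_true, decide_eq_true_eq]
          omega
        rw [pvCovered_append, pvCovered_append]
        simp only [pvCovered, List.any_cons, List.any_nil, Bool.or_false]
        rw [hone]
        ac_rfl
      · have hstep : pvMergeStep (m, some c) p = (m, some c) := by
          simp [pvMergeStep, hle, hgt]
        rw [hstep]
        obtain ⟨m', c', heq, hp', hc', hcov⟩ := ih m c
          (fun q hq => le_trans hcp (h1t q hq)) hsortt hp hc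
        refine ⟨m', c', heq, hp', hc', fun x => ?_⟩
        rw [hcov x]
        have hA : pvCovered (p :: t) x
            = ((decide (p.1 ≤ x) && decide (x ≤ p.2)) || pvCovered t x) := by
          simp [pvCovered]
        have key : ((decide (p.1 ≤ x) && decide (x ≤ p.2)) || pvCovered (m ++ [c]) x)
            = pvCovered (m ++ [c]) x := by
          rw [pvCovered_append]
          simp only [pvCovered, List.any_cons, List.any_nil, Bool.or_false]
          generalize (m.any fun q => decide (q.1 ≤ x) && decide (x ≤ q.2)) = b
          rw [Bool.eq_iff_iff]
          simp only [Bool.or_eq_true, Bool.and_eq_true, decide_eq_true_eq]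
          constructor
          · rintro (⟨ha1, ha2⟩ | h)
            · right; omega
            · exact h
          · intro h; right; exact h
        calc (pvCovered (m ++ [c]) x || pvCovered t x)
            = (((decide (p.1 ≤ x) && decide (x ≤ p.2)) || pvCovered (m ++ [c]) x) || pvCovered t x) := by
              rw [key]
          _ = (pvCovered (m ++ [c]) x || ((decide (p.1 ≤ x) && decide (x ≤ p.2)) || pvCovered t x)) := by
              ac_rfl
          _ = (pvCovered (m ++ [c]) x || pvCovered (p :: t) x) := by rw [← hA]
    · have hstep : pvMergeStep (m, some c) p = (m ++ [c], some p) := by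
        simp [pvMergeStep, hle]
      rw [hstep]
      obtain ⟨m', c', heq, hp', hc', hcov⟩ := ih (m ++ [c]) p h1t hsortt
        (by
          rw [List.pairwise_append]
          refine ⟨hp, by simp, fun a ha b hb => ?_⟩
          simp only [List.mem_singleton] at hb; subst hb
          rw [List.mem_append] at ha
          rcases ha with ha | ha
          · rw [List.pairwise_append] at hp
            exact le_trans (hp.2.2 a ha c (by simp)) hcp
          · simp only [List.mem_singleton] at ha; subst ha; exact hcp)
        (by
          rw [List.isChain_append]
          refine ⟨hc, by simp, fun a ha b hb => ?_⟩
          rw [List.getLast?_concat] at ha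
          simp only [Option.mem_def, Option.some.injEq] at ha
          simp only [List.head?_cons, Option.mem_def, Option.some.injEq] at hb
          subst ha; subst hb; omega)
      refine ⟨m', c', heq, hp', hc', fun x => ?_⟩
      rw [hcov x]
      have hA : pvCovered (p :: t) x
          = ((decide (p.1 ≤ x) && decide (x ≤ p.2)) || pvCovered t x) := by
        simp [pvCovered]
      have hB : pvCovered ((m ++ [c]) ++ [p]) x
          = (pvCovered (m ++ [c]) x || (decide (p.1 ≤ x) && decide (x ≤ p.2))) := by
        rw [pvCovered_append]
        simp [pvCovered]
      rw [hB, hA]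
      ac_rfl

theorem merged_spec (l : List (Int × Int)) (hl : l.Pairwise (fun a b => a.1 ≤ b.1)) :
    ∃ M : List (Int × Int),
      (match (l.foldl pvMergeStep ([], none)).2 with
        | some c => (l.foldl pvMergeStep ([], none)).1 ++ [c]
        | none => (l.foldl pvMergeStep ([], none)).1) = M ∧
      M.Pairwise (fun a b => a.1 ≤ b.1) ∧
      M.IsChain (fun a b => a.2 < b.1) ∧
      ∀ x, pvCovered M x = pvCovered l x := by
  cases l with
  | nil => exact ⟨[], rfl, by simp, by simp, fun x => rfl⟩
  | cons p t =>
    have hstep : pvMergeStep ([], none) p = ([], some p) := rfl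
    obtain ⟨m', c', heq, hp', hc', hcov⟩ := merge_inv t [] p
      (List.pairwise_cons.mp hl).1 (List.pairwise_cons.mp hl).2
      (by simp) (by simp)
    refine ⟨m' ++ [c'], ?_, hp', hc', fun x => ?_⟩
    · simp only [List.foldl_cons, hstep, heq]
    · rw [hcov x]
      simp [pvCovered]

theorem bisect_check (M : List (Int × Int))
    (hp : M.Pairwise (fun a b => a.1 ≤ b.1))
    (hc : M.IsChain (fun a b => a.2 < b.1)) (x : Int) :
    (PySem.List.bisectRight (M.map (fun p => p.1)) x = 0 ∨
      x > (M.map (fun p => p.2)).getD (PySem.List.bisectRight (M.map (fun p => p.1)) x - 1) 0)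
    ↔ pvCovered M x = false := by
  have hps : (M.map (fun p => p.1)).Pairwise (· ≤ ·) := List.pairwise_map.mpr hp
  obtain ⟨hb1, hb2, hb3⟩ := PySem.List.bisectRight_spec (M.map (fun p => p.1)) x hps
  set i := PySem.List.bisectRight (M.map (fun p => p.1)) x with hi
  simp only [List.length_map] at hb1 hb2 hb3
  have hmono : ∀ (a b : ℕ) (ha : a < M.length) (hb : b < M.length), a ≤ b → M[a].1 ≤ M[b].1 := by
    intro a b ha hb hab
    rcases Nat.lt_or_eq_of_le hab with h | h
    · exact List.pairwise_iff_getElem.mp hp a b ha hb h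
    · subst h; exact le_rfl
  have hcovT : pvCovered M x = true ↔ ∃ (j : ℕ) (hj : j < M.length), M[j].1 ≤ x ∧ x ≤ M[j].2 := by
    simp only [pvCovered, List.any_eq_true, Bool.and_eq_true, decide_eq_true_eq]
    constructor
    · rintro ⟨q, hq, h1, h2⟩
      obtain ⟨j, hj, rfl⟩ := List.mem_iff_getElem.mp hq
      exact ⟨j, hj, h1, h2⟩
    · rintro ⟨j, hj, h1, h2⟩
      exact ⟨M[j], List.getElem_mem hj, h1, h2⟩
  rcases Nat.eq_zero_or_pos i with hz | hpos
  · simp only [hz, gt_iff_lt, true_or, true_iff]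
    rw [← Bool.not_eq_true, hcovT]
    rintro ⟨j, hj, h1, h2⟩
    have := hb3 j hj (by omega)
    simp only [List.getElem_map] at this
    omega
  · have him1 : i - 1 < M.length := by omega
    have hgetend : (M.map (fun p => p.2)).getD (i - 1) 0 = M[i-1].2 := by
      rw [List.getD_eq_getElem _ _ (by simpa using him1)]
      simp
    have hstart : M[i-1].1 ≤ x := by
      have := hb2 (i-1) him1 (by omega)
      simpa only [List.getElem_map] using this
    constructor
    · rintro (h | h)
      · omega
      · rw [hgetend] at h
        rw [← Bool.not_eq_true, hcovT]
        rintro ⟨j, hj, h1, h2⟩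
        rcases lt_trichotomy j (i-1) with hlt | heq | hgt
        · -- ends[j] < starts[j+1] ≤ starts[i-1] ≤ x, contradiction with x ≤ M[j].2
          have hchain : M[j].2 < M[j+1].1 := by
            have := List.isChain_iff_getElem.mp hc j (by omega)
            exact this
          have := hmono (j+1) (i-1) (by omega) him1 (by omega)
          omega
        · subst heq; omega
        · have := hb3 j hj (by omega)
          simp only [List.getElem_map] at this
          omega
    · intro h
      right
      rw [hgetend]
      rw [← Bool.not_eq_true, hcovT] at h
      by_contra hcon
      exact h ⟨i-1, him1, hstart, by omega⟩


theorem merged_of_spec (ns : List (Int × Int)) :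
    ∃ M : List (Int × Int), pvMergedOf ns = M ∧
      M.Pairwise (fun a b => a.1 ≤ b.1) ∧
      M.IsChain (fun a b => a.2 < b.1) ∧
      ∀ x, pvCovered M x = pvCovered ns x := by
  obtain ⟨M, hM, hp, hc, hcov⟩ := merged_spec (PySem.List.sorted ns (fun p => p.1) false)
    (PySem.List.sorted_pairwise ns (fun p => p.1))
  refine ⟨M, hM, hp, hc, fun x => ?_⟩
  rw [hcov x]
  exact (PySem.List.sorted_perm ns (fun p => p.1) false).any_eq

-- A's inner for/break loop is the `any` of interval membership
theorem foldA_eq (l : List (Int × Int)) (x : Int) :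
    l.foldl (fun ok p => if p.1 ≤ x ∧ x ≤ p.2 then true else ok) false = pvCovered l x := by
  have hfun : (fun (ok : Bool) (p : Int × Int) => if p.1 ≤ x ∧ x ≤ p.2 then true else ok)
      = (fun ok p => if (fun p : Int × Int => decide (p.1 ≤ x) && decide (x ≤ p.2)) p = true then true else ok) := by
    funext ok p
    by_cases h : p.1 ≤ x ∧ x ≤ p.2 <;> simp [h]
  rw [hfun, PySem.List.foldl_if_true_eq]
  simp [pvCovered]

-- both method loops, over arbitrary method list, nested intervals and class bounds
theorem fold_eq (ms : List (List (String × List (String × Int)))) (ns : List (Int × Int)) (cs ce : Int) :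
    ms.foldl (fun acc method =>
      let method_line := pyGetDflt (pyGetDflt method "line_range" []) "start" 0
      if cs ≤ method_line ∧ method_line ≤ ce then
        let in_nested_class := ns.foldl (fun ok p =>
          if p.1 ≤ method_line ∧ method_line ≤ p.2 then true else ok) false
        if ¬ in_nested_class then acc ++ [method] else acc
      else acc) []
    = ms.foldl (fun acc m =>
      let x := pyGetDflt (pyGetDflt m "line_range" []) "start" 0
      if cs ≤ x ∧ x ≤ ce then
        if PySem.List.bisectRight ((pvMergedOf ns).map (fun p => p.1)) x = 0 ∨
            x > ((pvMergedOf ns).map (fun p => p.2)).getD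
              (PySem.List.bisectRight ((pvMergedOf ns).map (fun p => p.1)) x - 1) 0
        then acc ++ [m] else acc
      else acc) [] := by
  obtain ⟨M, hM, hp, hc, hcov⟩ := merged_of_spec ns
  congr 1
  funext acc m
  simp only [hM, foldA_eq]
  refine if_congr Iff.rfl (if_congr ?_ rfl rfl) rfl
  rw [Bool.not_eq_true, ← hcov]
  exact (bisect_check M hp hc _).symm

-- ===== VERDICT (by name: the statement is the Claim_ definition above) =====
theorem get_class_methods_py_spec : Claim_equal_get_class_methods_py := by
  intro data class_line_range _
  show get_class_methods_py data class_line_range = get_class_methods_py_alt data class_line_range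
  exact fold_eq (pyGetDflt data "methods" [])
    ((pyGetDflt data "classes" ([] : List (List (String × List (String × Int))))).foldl
      (fun acc cls =>
        let cls_range := pyGetDflt cls "line_range" []
        let cls_start := pyGetDflt cls_range "start" 0
        let cls_end := pyGetDflt cls_range "end" 0
        if pyGetDflt class_line_range "start" 0 < cls_start ∧ cls_end < pyGetDflt class_line_range "end" 0
        then acc ++ [(cls_start, cls_end)] else acc) [])
    (pyGetDflt class_line_range "start" 0) (pyGetDflt class_line_range "end" 0)
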